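-- pv_equiv track=rewrite | github.com/Rye-lxy/Caspeak | bin/plotter.py | alignmentPixels
-- ===== SOURCE A (Python) =====
-- def drawLineForward(hits, width, bp_per_pix, beg1, beg2, size):
--     while True:
--         q1, r1 = divmod(beg1, bp_per_pix)
--         q2, r2 = divmod(beg2, bp_per_pix)
--         hits[q2 * width + q1] |= 1
--         next_pix = min(bp_per_pix - r1, bp_per_pix - r2)
--         if next_pix >= size: break
--         beg1 += next_pix
--         beg2 += next_pix
--         size -= next_pix
--
-- def drawLineReverse(hits, width, bp_per_pix, beg1, beg2, size):
--     while True: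
--         q1, r1 = divmod(beg1, bp_per_pix)
--         q2, r2 = divmod(beg2, bp_per_pix)
--         hits[q2 * width + q1] |= 2
--         next_pix = min(bp_per_pix - r1, r2 + 1)
--         if next_pix >= size: break
--         beg1 += next_pix
--         beg2 -= next_pix
--         size -= next_pix
--
-- def strandAndOrigin(ranges, beg, size):
--     isReverseStrand = (beg < 0)
--     if isReverseStrand:
--         beg = -(beg + size)
--     for rangeBeg, rangeEnd, isReverseRange, origin in ranges:
--         if rangeEnd > beg:  # assumes the ranges are sorted
--             return (isReverseStrand != isReverseRange), origin
--
-- def alignmentPixels(width, height, alignments, bp_per_pix,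
--                     rangeDict1, rangeDict2):
--     hits = [0] * (width * height)  # the image data
--     for seq1, seq2, blocks in alignments:
--         beg1, beg2, size = blocks[0]
--         isReverse1, ori1 = strandAndOrigin(rangeDict1[seq1], beg1, size)
--         isReverse2, ori2 = strandAndOrigin(rangeDict2[seq2], beg2, size)
--         for beg1, beg2, size in blocks:
--             if isReverse1:
--                 beg1 = -(beg1 + size)
--                 beg2 = -(beg2 + size)
--             if isReverse1 == isReverse2:
--                 drawLineForward(hits, width, bp_per_pix,
--                                 ori1 + beg1, ori2 + beg2, size)
--             else:
--                 drawLineReverse(hits, width, bp_per_pix,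
--                                 ori1 + beg1, ori2 - beg2 - 1, size)
--     return hits
-- ===== SOURCE B (Python) =====
-- def _strandOrigin(ranges, beg, size):
--     isReverseStrand = beg < 0
--     b = -(beg + size) if isReverseStrand else beg
--     flip, origin = next((r[2], r[3]) for r in ranges if r[1] > b)
--     return isReverseStrand != flip, origin
--
-- def alignmentPixels(width, height, alignments, bp_per_pix,
--                     rangeDict1, rangeDict2):
--     hits = [0] * (width * height)
--     for seq1, seq2, blocks in alignments:
--         beg1, beg2, size = blocks[0]
--         isReverse1, ori1 = _strandOrigin(rangeDict1[seq1], beg1, size)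
--         isReverse2, ori2 = _strandOrigin(rangeDict2[seq2], beg2, size)
--         for beg1, beg2, size in blocks:
--             if isReverse1:
--                 beg1 = -(beg1 + size)
--                 beg2 = -(beg2 + size)
--             if isReverse1 == isReverse2:
--                 x, y, step, bit = ori1 + beg1, ori2 + beg2, 1, 1
--             else:
--                 x, y, step, bit = ori1 + beg1, ori2 - beg2 - 1, -1, 2
--             for t in range(max(size, 1)):
--                 hits[(y + step * t) // bp_per_pix * width + (x + t) // bp_per_pix] |= bit
--     return hits
-- ===== Notes on version B (the rewrite author's own statement) =====
-- stated objective: alternative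
-- what changed: The two boundary-jump while-loops (divmod, then jump to the nearest next pixel edge) are replaced by a single unified per-base loop that recomputes both pixel coordinates with a closed index formula (y+step*t)//bp*width+(x+t)//bp for every base of the block, and strandAndOrigin's explicit scan-and-return loop by a generator/next first-match expression.
import Mathlib
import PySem

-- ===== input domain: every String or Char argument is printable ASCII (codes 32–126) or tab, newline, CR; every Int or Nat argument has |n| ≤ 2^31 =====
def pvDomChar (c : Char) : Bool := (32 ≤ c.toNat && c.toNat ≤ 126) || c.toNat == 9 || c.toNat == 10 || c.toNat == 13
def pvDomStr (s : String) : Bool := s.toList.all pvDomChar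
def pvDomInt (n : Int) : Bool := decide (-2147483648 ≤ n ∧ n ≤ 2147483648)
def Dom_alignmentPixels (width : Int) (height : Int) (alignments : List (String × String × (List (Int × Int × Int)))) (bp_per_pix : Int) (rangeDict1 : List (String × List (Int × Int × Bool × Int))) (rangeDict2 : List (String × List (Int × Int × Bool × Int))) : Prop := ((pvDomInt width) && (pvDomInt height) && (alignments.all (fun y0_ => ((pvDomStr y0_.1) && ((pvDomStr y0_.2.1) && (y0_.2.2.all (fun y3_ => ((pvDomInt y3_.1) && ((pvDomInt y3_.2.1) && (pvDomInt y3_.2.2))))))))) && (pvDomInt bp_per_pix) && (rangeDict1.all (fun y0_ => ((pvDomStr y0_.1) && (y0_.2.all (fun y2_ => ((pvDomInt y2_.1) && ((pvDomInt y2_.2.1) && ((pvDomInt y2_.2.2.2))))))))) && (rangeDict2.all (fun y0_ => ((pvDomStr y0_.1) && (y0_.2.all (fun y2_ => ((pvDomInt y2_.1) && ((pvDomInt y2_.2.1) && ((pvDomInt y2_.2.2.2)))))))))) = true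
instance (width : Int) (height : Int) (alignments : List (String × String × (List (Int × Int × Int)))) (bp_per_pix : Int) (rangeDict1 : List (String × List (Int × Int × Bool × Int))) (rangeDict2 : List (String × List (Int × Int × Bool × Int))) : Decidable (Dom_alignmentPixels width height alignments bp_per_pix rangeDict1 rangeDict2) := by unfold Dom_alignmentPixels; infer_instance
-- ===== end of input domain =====

-- B replaces A's boundary-jump while-loops (divmod + jump to the next pixel edge) by a single
-- per-base loop with a closed pixel-index formula; same return value, similar cost (objective: alternative).

-- ===== PORT A =====
-- hits[i] |= v  (Python list write, via the PySem get/set primitives: negative index counts from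
-- the end; out of range = IndexError, excluded by Pre_; there the helper is a no-op)
def pyOrAtA (hits : List Int) (i v : Int) : List Int :=
  match PySem.List.pyGet? hits i with
  | some a => (PySem.List.pySet? hits i (PySem.Int.bor a v)).getD hits
  | none => hits
-- while-loop of drawLineForward, fuel = size.toNat + 1 (suffices whenever A terminates: for
-- bp > 0 each iteration consumes ≥ 1 of size; for bp < 0 A breaks on the first iteration or loops forever)
def drawLineForward (fuel : Nat) (hits : List Int) (width bp beg1 beg2 size : Int) : List Int :=
  match fuel with
  | 0 => hits
  | fuel + 1 =>
    let q1 := PySem.Int.floordiv beg1 bp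
    let r1 := PySem.Int.mod beg1 bp
    let q2 := PySem.Int.floordiv beg2 bp
    let r2 := PySem.Int.mod beg2 bp
    let hits' := pyOrAtA hits (q2 * width + q1) 1
    let nextPix := min (bp - r1) (bp - r2)
    if nextPix ≥ size then hits'
    else drawLineForward fuel hits' width bp (beg1 + nextPix) (beg2 + nextPix) (size - nextPix)

def drawLineReverse (fuel : Nat) (hits : List Int) (width bp beg1 beg2 size : Int) : List Int :=
  match fuel with
  | 0 => hits
  | fuel + 1 =>
    let q1 := PySem.Int.floordiv beg1 bp
    let r1 := PySem.Int.mod beg1 bp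
    let q2 := PySem.Int.floordiv beg2 bp
    let r2 := PySem.Int.mod beg2 bp
    let hits' := pyOrAtA hits (q2 * width + q1) 2
    let nextPix := min (bp - r1) (r2 + 1)
    if nextPix ≥ size then hits'
    else drawLineReverse fuel hits' width bp (beg1 + nextPix) (beg2 - nextPix) (size - nextPix)

def saoLoopA (isRev : Bool) (b : Int) : List (Int × Int × Bool × Int) → Option (Bool × Int)
  | [] => none
  | (_, rangeEnd, isRevRange, origin) :: rest =>
    if rangeEnd > b then some (isRev != isRevRange, origin) else saoLoopA isRev b rest

-- strandAndOrigin; returns none where the Python returns None (unpacking it then raises: outside Pre_)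
def strandAndOriginA (ranges : List (Int × Int × Bool × Int)) (beg size : Int) : Option (Bool × Int) :=
  let isRev : Bool := decide (beg < 0)
  saoLoopA isRev (if isRev then -(beg + size) else beg) ranges

def alignmentPixels (width : Int) (height : Int) (alignments : List (String × String × (List (Int × Int × Int)))) (bp_per_pix : Int) (rangeDict1 : List (String × List (Int × Int × Bool × Int))) (rangeDict2 : List (String × List (Int × Int × Bool × Int))) : List Int :=
  alignments.foldl (fun hits a =>
    match a with
    | (seq1, seq2, blocks) =>
      match blocks.head? with
      | none => hits          -- blocks[0]: IndexError, outside Pre_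
      | some (b1, b2, sz) =>
        match (PySem.Dict.mk rangeDict1).get? seq1, (PySem.Dict.mk rangeDict2).get? seq2 with
        | some rs1, some rs2 =>
          match strandAndOriginA rs1 b1 sz, strandAndOriginA rs2 b2 sz with
          | some (isRev1, ori1), some (isRev2, ori2) =>
            blocks.foldl (fun hits blk =>
              match blk with
              | (b1, b2, sz) =>
                let b1 := if isRev1 then -(b1 + sz) else b1
                let b2 := if isRev1 then -(b2 + sz) else b2
                if isRev1 == isRev2 then
                  drawLineForward (sz.toNat + 1) hits width bp_per_pix (ori1 + b1) (ori2 + b2) sz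
                else
                  drawLineReverse (sz.toNat + 1) hits width bp_per_pix (ori1 + b1) (ori2 - b2 - 1) sz) hits
          | _, _ => hits      -- TypeError unpacking None, outside Pre_
        | _, _ => hits        -- KeyError, outside Pre_
    ) (List.replicate (width * height).toNat 0)

-- ===== PORT B =====
-- hits[i] |= v, B's copy of the same Python-exact write
def pyOrAtB (hits : List Int) (i v : Int) : List Int :=
  let j := if i < 0 then i + hits.length else i
  if _h : 0 ≤ j ∧ j < (hits.length : Int) then
    hits.set j.toNat (PySem.Int.bor (hits.getD j.toNat 0) v)
  else hits

-- for t in range(max(size,1)): hits[(y+step*t)//bp*width + (x+t)//bp] |= bit   (x, y shifted per step)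
def drawDots (hits : List Int) (width bp x y step bit : Int) : Nat → List Int
  | 0 => hits
  | n + 1 =>
    drawDots (pyOrAtB hits (PySem.Int.floordiv y bp * width + PySem.Int.floordiv x bp) bit)
      width bp (x + 1) (y + step) step bit n

def strandOriginAlt (ranges : List (Int × Int × Bool × Int)) (beg size : Int) : Option (Bool × Int) :=
  let isRev : Bool := decide (beg < 0)
  let b := if isRev then -(beg + size) else beg
  match ranges.find? (fun r => decide (r.2.1 > b)) with
  | some (_, _, flip, origin) => some (isRev != flip, origin)
  | none => none

def alignmentPixels_alt (width : Int) (height : Int) (alignments : List (String × String × (List (Int × Int × Int)))) (bp_per_pix : Int) (rangeDict1 : List (String × List (Int × Int × Bool × Int))) (rangeDict2 : List (String × List (Int × Int × Bool × Int))) : List Int :=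
  alignments.foldl (fun hits a =>
    let blocks := a.2.2
    let info : Option ((Bool × Int) × (Bool × Int)) :=
      blocks.head?.bind (fun blk =>
        ((PySem.Dict.mk rangeDict1).get? a.1).bind (fun rs1 =>
          ((PySem.Dict.mk rangeDict2).get? a.2.1).bind (fun rs2 =>
            (strandOriginAlt rs1 blk.1 blk.2.2).bind (fun p1 =>
              (strandOriginAlt rs2 blk.2.1 blk.2.2).map (fun p2 => (p1, p2))))))
    info.elim hits (fun t =>
      let isRev1 := t.1.1
      let ori1 := t.1.2
      let isRev2 := t.2.1
      let ori2 := t.2.2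
      blocks.foldl (fun hits blk =>
        let b1 := if isRev1 then -(blk.1 + blk.2.2) else blk.1
        let b2 := if isRev1 then -(blk.2.1 + blk.2.2) else blk.2.1
        let p : Int × Int × Int × Int :=
          if isRev1 == isRev2 then (ori1 + b1, ori2 + b2, 1, 1)
          else (ori1 + b1, ori2 - b2 - 1, -1, 2)
        drawDots hits width bp_per_pix p.1 p.2.1 p.2.2.1 p.2.2.2 (max blk.2.2 1).toNat) hits)
    ) (List.replicate (width * height).toNat 0)

-- ===== PRECONDITION & SPEC =====
-- one drawn line, starting pixel coordinates (beg1 = x, beg2 = y), direction step, size s: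
-- for bp > 0: every per-base pixel index the line touches must lie inside the image (A raises
-- IndexError on the first one outside; a negative index ≥ -len wraps in Python and is allowed);
-- for bp < 0: A must break on its very first iteration (otherwise its while-loop never
-- terminates), and the single pixel it writes must lie inside the image
def lineOKb (L w bp x y step s : Int) : Bool :=
  if 0 < bp then
    (List.range (max s 1).toNat).all (fun t =>
      decide (-L ≤ PySem.Int.floordiv (y + step * (t : Int)) bp * w + PySem.Int.floordiv (x + (t : Int)) bp ∧
              PySem.Int.floordiv (y + step * (t : Int)) bp * w + PySem.Int.floordiv (x + (t : Int)) bp < L))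
  else
    decide (s ≤ min (bp - PySem.Int.mod x bp)
                    (if step = 1 then bp - PySem.Int.mod y bp else PySem.Int.mod y bp + 1) ∧
            -L ≤ PySem.Int.floordiv y bp * w + PySem.Int.floordiv x bp ∧
            PySem.Int.floordiv y bp * w + PySem.Int.floordiv x bp < L)

def blockOKb (L w bp : Int) (r1 r2 : Bool) (o1 o2 : Int) (blk : Int × Int × Int) : Bool :=
  let b1 := if r1 then -(blk.1 + blk.2.2) else blk.1
  let b2 := if r1 then -(blk.2.1 + blk.2.2) else blk.2.1
  if r1 == r2 then lineOKb L w bp (o1 + b1) (o2 + b2) 1 blk.2.2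
  else lineOKb L w bp (o1 + b1) (o2 - b2 - 1) (-1) blk.2.2

-- Pre_-side copy of the first-match strand/origin computation (so that Pre_ shares no helper with the ports)
def soPre (ranges : List (Int × Int × Bool × Int)) (beg size : Int) : Option (Bool × Int) :=
  (ranges.find? (fun r => decide ((if beg < 0 then -(beg + size) else beg) < r.2.1))).map
    (fun r => (decide (beg < 0) != r.2.2.1, r.2.2.2))

def alignOKb (L w bp : Int) (rd1 rd2 : List (String × List (Int × Int × Bool × Int))) (a : String × String × List (Int × Int × Int)) : Bool :=
  (a.2.2.head?.bind (fun blk =>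
    ((PySem.Dict.mk rd1).get? a.1).bind (fun rs1 =>
      ((PySem.Dict.mk rd2).get? a.2.1).bind (fun rs2 =>
        (soPre rs1 blk.1 blk.2.2).bind (fun p1 =>
          (soPre rs2 blk.2.1 blk.2.2).map (fun p2 =>
            a.2.2.all (blockOKb L w bp p1.1 p2.1 p1.2 p2.2))))))).getD false

-- Pre_ excludes exactly the inputs on which A raises or diverges: bp_per_pix = 0 (ZeroDivisionError),
-- an empty block list / missing dict key / no matching sorted range (IndexError/KeyError/TypeError),
-- a drawn pixel index outside the image (IndexError), or bp_per_pix < 0 without A's immediate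
-- first-iteration break (A's while-loop then never terminates).
def Pre_alignmentPixels (width : Int) (height : Int) (alignments : List (String × String × (List (Int × Int × Int)))) (bp_per_pix : Int) (rangeDict1 : List (String × List (Int × Int × Bool × Int))) (rangeDict2 : List (String × List (Int × Int × Bool × Int))) : Prop :=
  alignments = [] ∨
  (bp_per_pix ≠ 0 ∧
   alignments.all (alignOKb (width * height) width bp_per_pix rangeDict1 rangeDict2) = true)
instance (width : Int) (height : Int) (alignments : List (String × String × (List (Int × Int × Int)))) (bp_per_pix : Int) (rangeDict1 : List (String × List (Int × Int × Bool × Int))) (rangeDict2 : List (String × List (Int × Int × Bool × Int))) : Decidable (Pre_alignmentPixels width height alignments bp_per_pix rangeDict1 rangeDict2) := by unfold Pre_alignmentPixels; infer_instance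

def pvWitness_alignmentPixels : Int × Int × (List (String × String × (List (Int × Int × Int)))) × Int × (List (String × List (Int × Int × Bool × Int))) × (List (String × List (Int × Int × Bool × Int))) :=
  (2, 2, [("a", "b", [(0, 0, 1)])], 1, [("a", [(0, 5, false, 0)])], [("b", [(0, 5, false, 0)])])

def Spec_alignmentPixels (width : Int) (height : Int) (alignments : List (String × String × (List (Int × Int × Int)))) (bp_per_pix : Int) (rangeDict1 : List (String × List (Int × Int × Bool × Int))) (rangeDict2 : List (String × List (Int × Int × Bool × Int))) (out : List Int) : Prop := out = alignmentPixels_alt width height alignments bp_per_pix rangeDict1 rangeDict2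
instance (width : Int) (height : Int) (alignments : List (String × String × (List (Int × Int × Int)))) (bp_per_pix : Int) (rangeDict1 : List (String × List (Int × Int × Bool × Int))) (rangeDict2 : List (String × List (Int × Int × Bool × Int))) (out : List Int) : Decidable (Spec_alignmentPixels width height alignments bp_per_pix rangeDict1 rangeDict2 out) := by unfold Spec_alignmentPixels; infer_instance

-- ===== CLAIM (what is proved, stated in full; the proofs are below) =====
def Claim_equal_alignmentPixels : Prop := ∀ (width : Int) (height : Int) (alignments : List (String × String × (List (Int × Int × Int)))) (bp_per_pix : Int) (rangeDict1 : List (String × List (Int × Int × Bool × Int))) (rangeDict2 : List (String × List (Int × Int × Bool × Int))), Dom_alignmentPixels width height alignments bp_per_pix rangeDict1 rangeDict2 → Pre_alignmentPixels width height alignments bp_per_pix rangeDict1 rangeDict2 → Spec_alignmentPixels width height alignments bp_per_pix rangeDict1 rangeDict2 (alignmentPixels width height alignments bp_per_pix rangeDict1 rangeDict2)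

-- ===== LEMMAS AND PROOFS =====

lemma pvLdiffAndSelf (n w : Nat) : Nat.ldiff n w &&& w = 0 := by
  apply Nat.eq_of_testBit_eq
  intro i
  simp only [Nat.testBit_land, Nat.testBit_ldiff, Nat.zero_testBit]
  cases h1 : n.testBit i <;> cases h2 : w.testBit i <;> simp
lemma pvLdiffAndLeft (n w : Nat) : Nat.ldiff n w &&& n = Nat.ldiff n w := by
  apply Nat.eq_of_testBit_eq
  intro i
  simp only [Nat.testBit_land, Nat.testBit_ldiff]
  cases h1 : n.testBit i <;> cases h2 : w.testBit i <;> simp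
lemma pvSubAnd (n : Nat) : ∀ w : Nat, n - (n &&& w) = Nat.ldiff n w := by
  induction n using Nat.binaryRec with
  | zero => intro w; simp [Nat.ldiff, Nat.bitwise_zero_left]
  | bit b m IH =>
    intro w
    rw [← Nat.bit_testBit_zero_shiftRight_one w]
    rw [Nat.land_bit, Nat.ldiff_bit]
    have hle : m &&& (w >>> 1) ≤ m := Nat.and_le_left
    have hIH := IH (w >>> 1)
    cases b <;> cases h2 : w.testBit 0 <;>
      simp [Nat.bit_val, ← hIH] <;> omega
lemma pvLdiffEqSelf (m w : Nat) (h : m &&& w = 0) : Nat.ldiff m w = m := by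
  apply Nat.eq_of_testBit_eq
  intro i
  have := congrArg (fun x => Nat.testBit x i) h
  simp only [Nat.testBit_land, Nat.zero_testBit] at this
  simp only [Nat.testBit_ldiff]
  cases h1 : m.testBit i <;> cases h2 : w.testBit i <;> simp_all

lemma pvBorAbsorb (a v : Int) : PySem.Int.bor (PySem.Int.bor a v) v = PySem.Int.bor a v := by
  unfold PySem.Int.bor
  by_cases ha : 0 ≤ a <;> by_cases hv : 0 ≤ v <;> simp only [ha, hv, if_pos, if_neg, not_false_iff]
  · -- a ≥ 0, v ≥ 0
    rw [if_pos (Int.natCast_nonneg _)]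
    simp
  · -- a ≥ 0, v < 0
    rw [if_neg (by omega)]
    congr 1
    have h1 : (-(-(((-v - 1).toNat - ((-v - 1).toNat &&& a.toNat) : Nat) : Int) - 1) - 1).toNat
        = (-v - 1).toNat - ((-v - 1).toNat &&& a.toNat) := by omega
    rw [h1, pvSubAnd, pvLdiffAndLeft]
  · -- a < 0, v ≥ 0
    rw [if_neg (by omega)]
    congr 2
    have h1 : (-(-(((-a - 1).toNat - ((-a - 1).toNat &&& v.toNat) : Nat) : Int) - 1) - 1).toNat
        = (-a - 1).toNat - ((-a - 1).toNat &&& v.toNat) := by omega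
    rw [h1, pvSubAnd]
    norm_cast
    exact pvLdiffEqSelf _ _ (by rw [pvSubAnd, pvLdiffAndSelf])
  · -- a < 0, v < 0
    rw [if_neg (by omega)]
    congr 1
    have h1 : (-(-((((-a - 1).toNat &&& (-v - 1).toNat : Nat)) : Int) - 1) - 1).toNat
        = (-a - 1).toNat &&& (-v - 1).toNat := by omega
    rw [h1, Nat.land_assoc, Nat.and_self]

lemma pvPyOrAtAB (h : List Int) (i v : Int) : pyOrAtA h i v = pyOrAtB h i v := by
  unfold pyOrAtA pyOrAtB
  simp only [PySem.List.pyGet?, PySem.List.pySet?, PySem.List.pyIdx?]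
  by_cases h0 : 0 ≤ i
  · have hneg : ¬ i < 0 := by omega
    by_cases h1 : i < (h.length : Int)
    · have hi : i.toNat < h.length := by omega
      rw [if_pos h0, if_pos h1]
      simp only [hneg, if_false]
      rw [dif_pos ⟨h0, by simpa using h1⟩]
      simp [List.getElem?_eq_getElem hi]
    · rw [if_pos h0, if_neg h1]
      simp only [hneg, if_false]
      rw [dif_neg (by omega)]
      rfl
  · have hneg : i < 0 := by omega
    rw [if_neg h0]
    by_cases h2 : -(h.length : Int) ≤ i
    · have hj : (h.length - (-i).toNat) = (i + h.length).toNat := by omega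
      have hlt : (h.length - (-i).toNat) < h.length := by omega
      rw [if_pos h2]
      simp only [hneg, if_true]
      rw [dif_pos (by constructor <;> omega)]
      have hlt2 : (i + (h.length : Int)).toNat < h.length := by omega
      simp [hj, List.getElem?_eq_getElem hlt2]
    · rw [if_neg h2]
      simp only [hneg, if_true]
      rw [dif_neg (by omega)]
      rfl

lemma pvPyOrAt_idem (h : List Int) (i v : Int) : pyOrAtB (pyOrAtB h i v) i v = pyOrAtB h i v := by
  by_cases hneg : i < 0 <;>
    unfold pyOrAtB <;>
    simp only [hneg, if_true, if_false] <;>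
    split_ifs with hc hc' <;>
    simp only [List.length_set] at * <;>
    first
      | rfl
      | (exact absurd hc' hc) | (exact absurd hc hc')
      | (rw [List.set_set]
         congr 1
         have hj : (if i < 0 then i + (h.length : Int) else i).toNat < h.length := by
           simp only [hneg, if_true, if_false]; omega
         simp only [hneg, if_true, if_false] at hj
         rw [List.getD_eq_getElem _ _ (by simpa using hj), List.getElem_set_self]
         exact pvBorAbsorb _ v)

-- floor-division is constant between pixel boundaries
lemma pvFdShiftUp (bp b t : Int) (hbp : 0 < bp) (ht : 0 ≤ t) (h : t < bp - PySem.Int.mod b bp) :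
    PySem.Int.floordiv (b + t) bp = PySem.Int.floordiv b bp := by
  have h0 := PySem.Int.floordiv_mul_add_mod b bp
  have h1 := PySem.Int.mod_nonneg (a := b) (b := bp) hbp
  rw [PySem.Int.floordiv_eq_iff_of_pos hbp]
  constructor <;> nlinarith

lemma pvFdShiftDown (bp b t : Int) (hbp : 0 < bp) (ht : 0 ≤ t) (h : t ≤ PySem.Int.mod b bp) :
    PySem.Int.floordiv (b - t) bp = PySem.Int.floordiv b bp := by
  have h0 := PySem.Int.floordiv_mul_add_mod b bp
  have h2 := PySem.Int.mod_lt (a := b) (b := bp) hbp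
  rw [PySem.Int.floordiv_eq_iff_of_pos hbp]
  constructor <;> nlinarith

-- if every base of the segment lands on the starting pixel, the dots collapse to one write
lemma pvDotsConst (w bp step bit : Int) : ∀ (n : Nat) (h : List Int) (x y : Int), n ≠ 0 →
    (∀ k : Nat, k < n → PySem.Int.floordiv (y + step * k) bp * w + PySem.Int.floordiv (x + k) bp
        = PySem.Int.floordiv y bp * w + PySem.Int.floordiv x bp) →
    drawDots h w bp x y step bit n = pyOrAtB h (PySem.Int.floordiv y bp * w + PySem.Int.floordiv x bp) bit := by
  intro n
  induction n with
  | zero => intro h x y hn _; exact absurd rfl hn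
  | succ m IH =>
    intro h x y _ hconst
    rw [drawDots]
    rcases Nat.eq_zero_or_pos m with hm | hm
    · subst hm; rfl
    · rw [IH _ _ _ (by omega) ?_]
      · have h1 : PySem.Int.floordiv (y + step) bp * w + PySem.Int.floordiv (x + 1) bp
            = PySem.Int.floordiv y bp * w + PySem.Int.floordiv x bp := by
          have := hconst 1 (by omega)
          simpa using this
        rw [h1, pvPyOrAt_idem]
      · intro k hk
        have hA := hconst (k + 1) (by omega)
        have hB := hconst 1 (by omega)
        push_cast at hA hB ⊢
        have e1 : y + step + step * (k : Int) = y + step * ((k : Int) + 1) := by ring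
        have e2 : x + 1 + (k : Int) = x + ((k : Int) + 1) := by ring
        rw [e1, e2, hA, ← hB]
        ring_nf

lemma pvDotsSplit (w bp step bit : Int) : ∀ (m n : Nat) (h : List Int) (x y : Int),
    drawDots h w bp x y step bit (m + n)
      = drawDots (drawDots h w bp x y step bit m) w bp (x + m) (y + step * m) step bit n := by
  intro m
  induction m with
  | zero => intro n h x y; simp [drawDots]
  | succ k IH =>
    intro n h x y
    have : k + 1 + n = (k + n) + 1 := by omega
    rw [this, drawDots, drawDots, IH]
    congr 1 <;> push_cast <;> ring

lemma pvForwardEq (w bp : Int) (hbp : 0 < bp) : ∀ (n : Nat) (h : List Int) (b1 b2 s : Int),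
    s ≤ (n : Int) →
    drawLineForward (n + 1) h w bp b1 b2 s = drawDots h w bp b1 b2 1 1 (max s 1).toNat := by
  intro n
  induction n with
  | zero =>
    intro h b1 b2 s hs
    have hr1 := PySem.Int.mod_nonneg (a := b1) (b := bp) hbp
    have hr1' := PySem.Int.mod_lt (a := b1) (b := bp) hbp
    have hr2 := PySem.Int.mod_nonneg (a := b2) (b := bp) hbp
    have hr2' := PySem.Int.mod_lt (a := b2) (b := bp) hbp
    rw [drawLineForward]
    rw [pvPyOrAtAB]
    rw [if_pos (by push_cast at hs; omega)]
    refine (pvDotsConst w bp 1 1 (max s 1).toNat h b1 b2 (by omega) ?_).symm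
    intro k hk
    have hk' : (k : Int) < bp - PySem.Int.mod b1 bp ∧ (k : Int) < bp - PySem.Int.mod b2 bp := by
      push_cast at hs; omega
    rw [one_mul, pvFdShiftUp bp b1 k hbp (by omega) hk'.1,
        pvFdShiftUp bp b2 k hbp (by omega) hk'.2]
  | succ m IH =>
    intro h b1 b2 s hs
    have hr1 := PySem.Int.mod_nonneg (a := b1) (b := bp) hbp
    have hr1' := PySem.Int.mod_lt (a := b1) (b := bp) hbp
    have hr2 := PySem.Int.mod_nonneg (a := b2) (b := bp) hbp
    have hr2' := PySem.Int.mod_lt (a := b2) (b := bp) hbp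
    rw [drawLineForward]
    rw [pvPyOrAtAB]
    by_cases hbreak : min (bp - PySem.Int.mod b1 bp) (bp - PySem.Int.mod b2 bp) ≥ s
    · rw [if_pos hbreak]
      refine (pvDotsConst w bp 1 1 (max s 1).toNat h b1 b2 (by omega) ?_).symm
      intro k hk
      have hk' : (k : Int) < bp - PySem.Int.mod b1 bp ∧ (k : Int) < bp - PySem.Int.mod b2 bp := by
        have : (k : Int) < max s 1 := by omega
        omega
      rw [one_mul, pvFdShiftUp bp b1 k hbp (by omega) hk'.1,
          pvFdShiftUp bp b2 k hbp (by omega) hk'.2]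
    · rw [if_neg hbreak]
      set nx := min (bp - PySem.Int.mod b1 bp) (bp - PySem.Int.mod b2 bp) with hnx
      have hnx1 : 1 ≤ nx := by omega
      have hsnx : 1 ≤ s - nx := by omega
      rw [IH _ _ _ _ (by push_cast at hs ⊢; omega)]
      have e1 : (max (s - nx) 1).toNat = (s - nx).toNat := by omega
      have e2 : (max s 1).toNat = nx.toNat + (s - nx).toNat := by omega
      rw [e1, e2, pvDotsSplit]
      have hc1 : drawDots h w bp b1 b2 1 1 nx.toNat
          = pyOrAtB h (PySem.Int.floordiv b2 bp * w + PySem.Int.floordiv b1 bp) 1 := by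
        refine pvDotsConst w bp 1 1 nx.toNat h b1 b2 (by omega) ?_
        intro k hk
        have hk' : (k : Int) < nx := by omega
        rw [one_mul, pvFdShiftUp bp b1 k hbp (by omega) (by omega),
            pvFdShiftUp bp b2 k hbp (by omega) (by omega)]
      rw [hc1]
      have e3 : b1 + (nx.toNat : Int) = b1 + nx := by omega
      have e4 : b2 + 1 * (nx.toNat : Int) = b2 + nx := by
        rw [one_mul]; omega
      rw [e3, e4]

lemma pvReverseEq (w bp : Int) (hbp : 0 < bp) : ∀ (n : Nat) (h : List Int) (b1 b2 s : Int),
    s ≤ (n : Int) →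
    drawLineReverse (n + 1) h w bp b1 b2 s = drawDots h w bp b1 b2 (-1) 2 (max s 1).toNat := by
  intro n
  induction n with
  | zero =>
    intro h b1 b2 s hs
    have hr1 := PySem.Int.mod_nonneg (a := b1) (b := bp) hbp
    have hr1' := PySem.Int.mod_lt (a := b1) (b := bp) hbp
    have hr2 := PySem.Int.mod_nonneg (a := b2) (b := bp) hbp
    have hr2' := PySem.Int.mod_lt (a := b2) (b := bp) hbp
    rw [drawLineReverse]
    rw [pvPyOrAtAB]
    rw [if_pos (by push_cast at hs; omega)]
    refine (pvDotsConst w bp (-1) 2 (max s 1).toNat h b1 b2 (by omega) ?_).symm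
    intro k hk
    have hk' : (k : Int) < bp - PySem.Int.mod b1 bp ∧ (k : Int) ≤ PySem.Int.mod b2 bp := by
      push_cast at hs; omega
    have e : b2 + (-1) * (k : Int) = b2 - (k : Int) := by ring
    rw [e, pvFdShiftUp bp b1 k hbp (by omega) hk'.1,
        pvFdShiftDown bp b2 k hbp (by omega) hk'.2]
  | succ m IH =>
    intro h b1 b2 s hs
    have hr1 := PySem.Int.mod_nonneg (a := b1) (b := bp) hbp
    have hr1' := PySem.Int.mod_lt (a := b1) (b := bp) hbp
    have hr2 := PySem.Int.mod_nonneg (a := b2) (b := bp) hbp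
    have hr2' := PySem.Int.mod_lt (a := b2) (b := bp) hbp
    rw [drawLineReverse]
    rw [pvPyOrAtAB]
    by_cases hbreak : min (bp - PySem.Int.mod b1 bp) (PySem.Int.mod b2 bp + 1) ≥ s
    · rw [if_pos hbreak]
      refine (pvDotsConst w bp (-1) 2 (max s 1).toNat h b1 b2 (by omega) ?_).symm
      intro k hk
      have hk0 : (k : Int) < max s 1 := by omega
      have e : b2 + (-1) * (k : Int) = b2 - (k : Int) := by ring
      rw [e, pvFdShiftUp bp b1 k hbp (by omega) (by omega),
          pvFdShiftDown bp b2 k hbp (by omega) (by omega)]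
    · rw [if_neg hbreak]
      set nx := min (bp - PySem.Int.mod b1 bp) (PySem.Int.mod b2 bp + 1) with hnx
      have hnx1 : 1 ≤ nx := by omega
      have hsnx : 1 ≤ s - nx := by omega
      rw [IH _ _ _ _ (by push_cast at hs ⊢; omega)]
      have e1 : (max (s - nx) 1).toNat = (s - nx).toNat := by omega
      have e2 : (max s 1).toNat = nx.toNat + (s - nx).toNat := by omega
      rw [e1, e2, pvDotsSplit]
      have hc1 : drawDots h w bp b1 b2 (-1) 2 nx.toNat
          = pyOrAtB h (PySem.Int.floordiv b2 bp * w + PySem.Int.floordiv b1 bp) 2 := by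
        refine pvDotsConst w bp (-1) 2 nx.toNat h b1 b2 (by omega) ?_
        intro k hk
        have hk' : (k : Int) < nx := by omega
        have e : b2 + (-1) * (k : Int) = b2 - (k : Int) := by ring
        rw [e, pvFdShiftUp bp b1 k hbp (by omega) (by omega),
            pvFdShiftDown bp b2 k hbp (by omega) (by omega)]
      rw [hc1]
      have e3 : b1 + (nx.toNat : Int) = b1 + nx := by omega
      have e4 : b2 + (-1) * (nx.toNat : Int) = b2 - nx := by
        have : ((nx.toNat : Int)) = nx := by omega
        rw [this]; ring
      rw [e3, e4]

-- bp < 0: A breaks on the first forward iteration (Pre_'s condition), writing exactly one pixel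
lemma pvForwardOne (w bp : Int) (hbp : bp < 0) (fuel : Nat) (h : List Int) (x y s : Int)
    (hs : s ≤ min (bp - PySem.Int.mod x bp) (bp - PySem.Int.mod y bp)) :
    drawLineForward (fuel + 1) h w bp x y s = drawDots h w bp x y 1 1 (max s 1).toNat := by
  have h1 := PySem.Int.mod_neg_bounds (a := x) (b := bp) hbp
  have h2 := PySem.Int.mod_neg_bounds (a := y) (b := bp) hbp
  have hm : (max s 1).toNat = 1 := by omega
  rw [drawLineForward, pvPyOrAtAB, if_pos (by omega : min (bp - PySem.Int.mod x bp) (bp - PySem.Int.mod y bp) ≥ s),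
      hm, drawDots, drawDots]

-- bp < 0: A breaks on the first reverse iteration (Pre_'s condition), writing exactly one pixel
lemma pvReverseOne (w bp : Int) (hbp : bp < 0) (fuel : Nat) (h : List Int) (x y s : Int)
    (hs : s ≤ min (bp - PySem.Int.mod x bp) (PySem.Int.mod y bp + 1)) :
    drawLineReverse (fuel + 1) h w bp x y s = drawDots h w bp x y (-1) 2 (max s 1).toNat := by
  have h1 := PySem.Int.mod_neg_bounds (a := x) (b := bp) hbp
  have h2 := PySem.Int.mod_neg_bounds (a := y) (b := bp) hbp
  have hm : (max s 1).toNat = 1 := by omega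
  rw [drawLineReverse, pvPyOrAtAB, if_pos (by omega : min (bp - PySem.Int.mod x bp) (PySem.Int.mod y bp + 1) ≥ s),
      hm, drawDots, drawDots]

lemma pvSaoLoop (isRev : Bool) (b : Int) : ∀ rs : List (Int × Int × Bool × Int),
    saoLoopA isRev b rs
      = (match rs.find? (fun r => decide (r.2.1 > b)) with
         | some (_, _, flip, origin) => some (isRev != flip, origin)
         | none => none) := by
  intro rs
  induction rs with
  | nil => rfl
  | cons hd tl IH =>
    obtain ⟨rb, re, ir, ori⟩ := hd
    rw [saoLoopA, List.find?_cons]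
    by_cases hre : re > b
    · simp [hre]
    · simp only [hre, decide_false, if_false]
      rw [IH]

lemma pvSaoEq (rs : List (Int × Int × Bool × Int)) (beg size : Int) :
    strandAndOriginA rs beg size = strandOriginAlt rs beg size := by
  unfold strandAndOriginA strandOriginAlt
  exact pvSaoLoop _ _ rs

lemma pvSoPreEq (rs : List (Int × Int × Bool × Int)) (beg size : Int) :
    soPre rs beg size = strandOriginAlt rs beg size := by
  unfold soPre strandOriginAlt
  have hb : (if decide (beg < 0) = true then -(beg + size) else beg)
      = (if beg < 0 then -(beg + size) else beg) := by
    by_cases h : beg < 0 <;> simp [h]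
  simp only [gt_iff_lt, hb]
  cases hf : List.find? (fun r : Int × Int × Bool × Int =>
      decide ((if beg < 0 then -(beg + size) else beg) < r.2.1)) rs with
  | none => rfl
  | some r =>
    obtain ⟨rb, re, fl, ori⟩ := r
    rfl

-- ===== VERDICT (by name: the statement is the Claim_ definition above) =====
theorem alignmentPixels_spec : Claim_equal_alignmentPixels := by
  intro width height alignments bp_per_pix rangeDict1 rangeDict2 _ hpre
  rcases hpre with hemp | ⟨hbp0, hall⟩
  · subst hemp; rfl
  unfold Spec_alignmentPixels
  unfold alignmentPixels alignmentPixels_alt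
  apply PySem.List.foldl_congr_mem
  intro hits a hamem
  have hok : alignOKb (width * height) width bp_per_pix rangeDict1 rangeDict2 a = true := by
    rw [List.all_eq_true] at hall
    exact hall a hamem
  obtain ⟨s1, s2, blocks⟩ := a
  dsimp only
  unfold alignOKb at hok
  dsimp only at hok
  cases hh : blocks.head? with
  | none => rfl
  | some fst =>
    obtain ⟨b1, b2, sz⟩ := fst
    cases hg1 : (PySem.Dict.mk rangeDict1).get? s1 with
    | none => cases hg2 : (PySem.Dict.mk rangeDict2).get? s2 <;> rfl
    | some rs1 =>
      cases hg2 : (PySem.Dict.mk rangeDict2).get? s2 with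
      | none => rfl
      | some rs2 =>
        dsimp only [Option.bind]
        rw [pvSaoEq rs1 b1 sz, pvSaoEq rs2 b2 sz]
        cases hso1 : strandOriginAlt rs1 b1 sz with
        | none => cases hso2 : strandOriginAlt rs2 b2 sz <;> simp
        | some p1 =>
          obtain ⟨r1, o1⟩ := p1
          cases hso2 : strandOriginAlt rs2 b2 sz with
          | none => simp
          | some p2 =>
            obtain ⟨r2, o2⟩ := p2
            simp only [hh, hg1, hg2, pvSoPreEq, hso1, hso2, Option.bind_some,
              Option.map_some, Option.getD_some] at hok
            dsimp only [Option.bind, Option.map, Option.elim]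
            apply PySem.List.foldl_congr_mem
            intro hits2 blk hbmem
            have hbok : blockOKb (width * height) width bp_per_pix r1 r2 o1 o2 blk = true := by
              rw [List.all_eq_true] at hok
              exact hok blk hbmem
            obtain ⟨c1, c2, csz⟩ := blk
            dsimp only
            unfold blockOKb at hbok
            dsimp only at hbok
            by_cases hr : (r1 == r2) = true
            · rw [if_pos hr, if_pos hr]
              rw [if_pos hr] at hbok
              by_cases hbpos : 0 < bp_per_pix
              · exact pvForwardEq width bp_per_pix hbpos csz.toNat hits2 _ _ csz (by omega)
              · have hneg : bp_per_pix < 0 := by omega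
                unfold lineOKb at hbok
                rw [if_neg hbpos, if_pos (show (1 : Int) = 1 from rfl), decide_eq_true_iff] at hbok
                exact pvForwardOne width bp_per_pix hneg csz.toNat hits2 _ _ csz hbok.1
            · rw [if_neg hr, if_neg hr]
              rw [if_neg hr] at hbok
              by_cases hbpos : 0 < bp_per_pix
              · exact pvReverseEq width bp_per_pix hbpos csz.toNat hits2 _ _ csz (by omega)
              · have hneg : bp_per_pix < 0 := by omega
                unfold lineOKb at hbok
                rw [if_neg hbpos, if_neg (by norm_num : ¬ ((-1 : Int) = 1)), decide_eq_true_iff] at hbok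
                exact pvReverseOne width bp_per_pix hneg csz.toNat hits2 _ _ csz hbok.1
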